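-- pv_equiv track=rewrite | github.com/Lukil33/University | Nest/Sammy/EsPlagio/main.py | Analizza
-- ===== SOURCE A (Python) =====
-- def Analizza(c1, c2):
--     L = max(len(c1), len(c2))
--     esito = "null"
--     for i in range (L-4):
--         if len(c1)>=len(c2):
--             note1 = [c1[i], c1[i+1], c1[i+2], c1[i+3]]
--             for j in range(len(c2)-4):
--                 note2 = [c2[j], c2[j+1], c2[j+2], c2[j+3]]
--                 if note1 == note2:
--                     esito = "copiatura"
--                 elif (c1[i]-c2[j])==(c1[i+1]-c2[j+1])==(c1[i+2]-c2[j+2])==(c1[i+3]-c2[j+3]):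
--                     esito = "sospetto"
--         if len(c1)<len(c2):
--             note1 = [c2[i], c2[i+1], c2[i+2], c2[i+3]]
--             for j in range(len(c1)-4):
--                 note2 = [c1[j], c1[j+1], c1[j+2], c1[j+3]]
--                 if note1 == note2:
--                     esito = "copiatura"
--                 elif (c1[j]-c2[i])==(c1[j+1]-c2[i+1])==(c1[j+2]-c2[i+2])==(c1[j+3]-c2[i+3]):
--                     esito = "sospetto"
--     return esito
-- ===== SOURCE B (Python) =====
-- def Analizza(c1, c2):
--     # same comparison set as the original (its loop bounds kept), but O(n+m):
--     # index the interval-shape of each shorter-sequence window once, then scan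
--     # the longer sequence backwards for the last matching pair.
--     if len(c1) >= len(c2):
--         a, s = c1, c2
--     else:
--         a, s = c2, c1
--     last = {}
--     for j in range(len(s) - 4):
--         last[(s[j+1]-s[j], s[j+2]-s[j+1], s[j+3]-s[j+2])] = j
--     for i in reversed(range(len(a) - 4)):
--         key = (a[i+1]-a[i], a[i+2]-a[i+1], a[i+3]-a[i+2])
--         if key in last:
--             return "copiatura" if a[i] == s[last[key]] else "sospetto"
--     return "null"
-- ===== Notes on version B (the rewrite author's own statement) =====
-- stated objective: faster
-- what changed: Replaces the nested scan over all window pairs by a dict mapping each interval-shape of the shorter melody's windows to its last start index, then a single backward scan of the longer melody returning at the first (i.e. lexicographically last) matching pair.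
import Mathlib
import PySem

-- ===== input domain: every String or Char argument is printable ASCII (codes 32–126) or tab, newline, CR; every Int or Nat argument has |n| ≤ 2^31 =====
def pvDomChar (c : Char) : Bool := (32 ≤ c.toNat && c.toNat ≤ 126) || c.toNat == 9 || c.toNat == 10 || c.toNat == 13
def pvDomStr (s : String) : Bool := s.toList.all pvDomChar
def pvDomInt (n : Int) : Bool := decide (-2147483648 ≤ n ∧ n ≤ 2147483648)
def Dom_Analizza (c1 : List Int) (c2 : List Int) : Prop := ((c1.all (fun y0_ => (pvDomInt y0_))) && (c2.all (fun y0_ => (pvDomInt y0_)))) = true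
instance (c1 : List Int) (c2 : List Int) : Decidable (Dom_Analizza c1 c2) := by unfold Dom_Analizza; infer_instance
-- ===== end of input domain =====

-- B replaces A's O(n*m) double window scan by hashing the interval shape of each
-- window of the shorter melody and scanning the longer one backwards for the last
-- matching pair (same comparison set, hence A's loop bounds are kept).

-- both ports index only within bounds (the loop bounds guarantee it), so the default 0 of pyget is never returned
def pyget (xs : List Int) (i : Int) : Int := PySem.List.pyGetD xs i 0

-- ===== PORT A =====
def Analizza (c1 : List Int) (c2 : List Int) : String :=
  let L : Int := max (c1.length : Int) (c2.length : Int)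
  (PySem.List.pyRange 0 (L - 4) 1).foldl (fun esito i =>
    let esito1 :=
      if c1.length ≥ c2.length then
        let note1 := [pyget c1 i, pyget c1 (i+1), pyget c1 (i+2), pyget c1 (i+3)]
        (PySem.List.pyRange 0 ((c2.length : Int) - 4) 1).foldl (fun esito j =>
          let note2 := [pyget c2 j, pyget c2 (j+1), pyget c2 (j+2), pyget c2 (j+3)]
          if note1 = note2 then "copiatura"
          else if pyget c1 i - pyget c2 j = pyget c1 (i+1) - pyget c2 (j+1) ∧
                  pyget c1 (i+1) - pyget c2 (j+1) = pyget c1 (i+2) - pyget c2 (j+2) ∧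
                  pyget c1 (i+2) - pyget c2 (j+2) = pyget c1 (i+3) - pyget c2 (j+3) then "sospetto"
          else esito) esito
      else esito
    if c1.length < c2.length then
      let note1 := [pyget c2 i, pyget c2 (i+1), pyget c2 (i+2), pyget c2 (i+3)]
      (PySem.List.pyRange 0 ((c1.length : Int) - 4) 1).foldl (fun esito j =>
        let note2 := [pyget c1 j, pyget c1 (j+1), pyget c1 (j+2), pyget c1 (j+3)]
        if note1 = note2 then "copiatura"
        else if pyget c1 j - pyget c2 i = pyget c1 (j+1) - pyget c2 (i+1) ∧
                pyget c1 (j+1) - pyget c2 (i+1) = pyget c1 (j+2) - pyget c2 (i+2) ∧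
                pyget c1 (j+2) - pyget c2 (i+2) = pyget c1 (j+3) - pyget c2 (i+3) then "sospetto"
        else esito) esito1
    else esito1) "null"

-- ===== PORT B =====
def bkey (xs : List Int) (j : Int) : Int × Int × Int :=
  (pyget xs (j+1) - pyget xs j, pyget xs (j+2) - pyget xs (j+1), pyget xs (j+3) - pyget xs (j+2))

def Analizza_alt (c1 : List Int) (c2 : List Int) : String :=
  let p := if c1.length ≥ c2.length then (c1, c2) else (c2, c1)
  let a := p.1
  let s := p.2
  let last : PySem.Dict (Int × Int × Int) Int :=
    (PySem.List.pyRange 0 ((s.length : Int) - 4) 1).foldl (fun d j => d.insert (bkey s j) j) PySem.Dict.empty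
  match (PySem.List.pyRange 0 ((a.length : Int) - 4) 1).reverse.findSome? (fun i =>
      match last.get? (bkey a i) with
      | some j => some (if pyget a i = pyget s j then "copiatura" else "sospetto")
      | none => none) with
  | some r => r
  | none => "null"

-- ===== PRECONDITION & SPEC =====
def Spec_Analizza (c1 : List Int) (c2 : List Int) (out : String) : Prop := out = Analizza_alt c1 c2
instance (c1 : List Int) (c2 : List Int) (out : String) : Decidable (Spec_Analizza c1 c2 out) := by unfold Spec_Analizza; infer_instance

-- ===== CLAIM (what is proved, stated in full; the proofs are below) =====
def Claim_equal_Analizza : Prop := ∀ (c1 : List Int) (c2 : List Int), Dom_Analizza c1 c2 → Spec_Analizza c1 c2 (Analizza c1 c2)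

-- ===== LEMMAS AND PROOFS =====

-- the per-pair event A's fold records: `some verdict` when the two windows have
-- the same interval shape, `none` otherwise
def optF (a s : List Int) (i j : Int) : Option String :=
  if bkey s j = bkey a i then some (if pyget a i = pyget s j then "copiatura" else "sospetto") else none

-- the common normal form of both programs: last matching pair in lexicographic order
def resAS (a s : List Int) : String :=
  (((PySem.List.pyRange 0 ((a.length : Int) - 4) 1).reverse).findSome? (fun i =>
    ((PySem.List.pyRange 0 ((s.length : Int) - 4) 1).reverse).findSome? (optF a s i))).getD "null"

lemma foldl_lastMatch {α β : Type} (l : List β) (f : β → Option α) (e : α) :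
    l.foldl (fun acc x => (f x).getD acc) e = (l.reverse.findSome? f).getD e := by
  induction l generalizing e with
  | nil => rfl
  | cons x xs ih =>
    rw [List.foldl_cons, ih, List.reverse_cons, List.findSome?_append]
    cases h : xs.reverse.findSome? f <;> cases h2 : f x <;> simp [h2]

lemma step1_eq (a s : List Int) (i : Int) :
    (fun (esito : String) (j : Int) =>
      if [pyget a i, pyget a (i+1), pyget a (i+2), pyget a (i+3)] =
         [pyget s j, pyget s (j+1), pyget s (j+2), pyget s (j+3)] then "copiatura"
      else if pyget a i - pyget s j = pyget a (i+1) - pyget s (j+1) ∧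
              pyget a (i+1) - pyget s (j+1) = pyget a (i+2) - pyget s (j+2) ∧
              pyget a (i+2) - pyget s (j+2) = pyget a (i+3) - pyget s (j+3) then "sospetto"
      else esito)
    = fun esito j => (optF a s i j).getD esito := by
  funext esito j
  simp only [optF, bkey, Prod.mk.injEq, List.cons.injEq, and_true]
  split_ifs <;> first | rfl | omega

lemma step2_eq (a s : List Int) (i : Int) :
    (fun (esito : String) (j : Int) =>
      if [pyget a i, pyget a (i+1), pyget a (i+2), pyget a (i+3)] =
         [pyget s j, pyget s (j+1), pyget s (j+2), pyget s (j+3)] then "copiatura"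
      else if pyget s j - pyget a i = pyget s (j+1) - pyget a (i+1) ∧
              pyget s (j+1) - pyget a (i+1) = pyget s (j+2) - pyget a (i+2) ∧
              pyget s (j+2) - pyget a (i+2) = pyget s (j+3) - pyget a (i+3) then "sospetto"
      else esito)
    = fun esito j => (optF a s i j).getD esito := by
  funext esito j
  simp only [optF, bkey, Prod.mk.injEq, List.cons.injEq, and_true]
  split_ifs <;> first | rfl | omega

lemma get?_foldl_insert (s : List Int) (l : List Int) (d0 : PySem.Dict (Int × Int × Int) Int) (k : Int × Int × Int) :
    (l.foldl (fun d j => d.insert (bkey s j) j) d0).get? k =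
    (match l.reverse.find? (fun j => bkey s j == k) with
     | some j => some j
     | none => d0.get? k) := by
  induction l generalizing d0 with
  | nil => rfl
  | cons x xs ih =>
    rw [List.foldl_cons, ih, List.reverse_cons, List.find?_append]
    cases h : xs.reverse.find? (fun j => bkey s j == k) with
    | some j => rfl
    | none =>
      by_cases hk : k = bkey s x
      · simp [hk, List.find?, PySem.Dict.get?_insert_self]
      · have : (bkey s x == k) = false := by simp [Ne.symm hk]
        simp [List.find?, this, PySem.Dict.get?_insert_of_ne d0 x hk]

lemma find_to_findSome (a s : List Int) (i : Int) (l : List Int) :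
    (l.find? (fun j => bkey s j == bkey a i)).map
      (fun j => if pyget a i = pyget s j then "copiatura" else "sospetto")
    = l.findSome? (optF a s i) := by
  induction l with
  | nil => rfl
  | cons x xs ih =>
    by_cases h : bkey s x = bkey a i
    · simp [List.find?, List.findSome?, h, optF]
    · have hb : (bkey s x == bkey a i) = false := by simp [h]
      simp [List.find?, List.findSome?, hb, optF, h, ih]

lemma A_eq_res (c1 c2 : List Int) :
    Analizza c1 c2 = if c2.length ≤ c1.length then resAS c1 c2 else resAS c2 c1 := by
  by_cases h : c2.length ≤ c1.length
  · have hmax : max (c1.length : Int) (c2.length : Int) = (c1.length : Int) := by omega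
    have hlt : ¬ (c1.length < c2.length) := by omega
    simp only [Analizza, hmax, ge_iff_le, h, hlt, if_false, if_pos]
    rw [show (fun (esito : String) (i : Int) =>
        (PySem.List.pyRange 0 ((c2.length : Int) - 4) 1).foldl
          (fun e j =>
            if [pyget c1 i, pyget c1 (i+1), pyget c1 (i+2), pyget c1 (i+3)] =
               [pyget c2 j, pyget c2 (j+1), pyget c2 (j+2), pyget c2 (j+3)] then "copiatura"
            else if pyget c1 i - pyget c2 j = pyget c1 (i+1) - pyget c2 (j+1) ∧
                    pyget c1 (i+1) - pyget c2 (j+1) = pyget c1 (i+2) - pyget c2 (j+2) ∧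
                    pyget c1 (i+2) - pyget c2 (j+2) = pyget c1 (i+3) - pyget c2 (j+3) then "sospetto"
            else e) esito)
      = fun esito i =>
        ((((PySem.List.pyRange 0 ((c2.length : Int) - 4) 1).reverse).findSome? (optF c1 c2 i))).getD esito from by
        funext esito i
        rw [step1_eq c1 c2 i, foldl_lastMatch]]
    rw [foldl_lastMatch]
    rfl
  · have hmax : max (c1.length : Int) (c2.length : Int) = (c2.length : Int) := by omega
    have hge : ¬ (c1.length ≥ c2.length) := by omega
    have hlt : c1.length < c2.length := by omega
    simp only [Analizza, hmax, ge_iff_le, hge, if_false, hlt, if_pos]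
    rw [show (fun (esito : String) (i : Int) =>
        (PySem.List.pyRange 0 ((c1.length : Int) - 4) 1).foldl
          (fun e j =>
            if [pyget c2 i, pyget c2 (i+1), pyget c2 (i+2), pyget c2 (i+3)] =
               [pyget c1 j, pyget c1 (j+1), pyget c1 (j+2), pyget c1 (j+3)] then "copiatura"
            else if pyget c1 j - pyget c2 i = pyget c1 (j+1) - pyget c2 (i+1) ∧
                    pyget c1 (j+1) - pyget c2 (i+1) = pyget c1 (j+2) - pyget c2 (i+2) ∧
                    pyget c1 (j+2) - pyget c2 (i+2) = pyget c1 (j+3) - pyget c2 (i+3) then "sospetto"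
            else e) esito)
      = fun esito i =>
        ((((PySem.List.pyRange 0 ((c1.length : Int) - 4) 1).reverse).findSome? (optF c2 c1 i))).getD esito from by
        funext esito i
        rw [step2_eq c2 c1 i, foldl_lastMatch]]
    rw [foldl_lastMatch]
    rfl

lemma alt_eq_res (c1 c2 : List Int) :
    Analizza_alt c1 c2 = if c2.length ≤ c1.length then resAS c1 c2 else resAS c2 c1 := by
  have hmap : ∀ (o : Option Int) (f : Int → String),
      (match o with | some j => some (f j) | none => none) = o.map f := by
    intro o f; cases o <;> rfl
  have hgetD : ∀ (o : Option String),
      (match o with | some r => r | none => "null") = o.getD "null" := by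
    intro o; cases o <;> rfl
  have key : ∀ (a s : List Int),
      ((PySem.List.pyRange 0 ((a.length : Int) - 4) 1).reverse.findSome? (fun i =>
        match ((PySem.List.pyRange 0 ((s.length : Int) - 4) 1).foldl
                 (fun d j => d.insert (bkey s j) j) PySem.Dict.empty).get? (bkey a i) with
        | some j => some (if pyget a i = pyget s j then "copiatura" else "sospetto")
        | none => none))
      = ((PySem.List.pyRange 0 ((a.length : Int) - 4) 1).reverse.findSome? (fun i =>
          ((PySem.List.pyRange 0 ((s.length : Int) - 4) 1).reverse).findSome? (optF a s i))) := by
    intro a s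
    congr 1
    funext i
    rw [hmap, get?_foldl_insert]
    have hemp : (PySem.Dict.empty : PySem.Dict (Int × Int × Int) Int).get? (bkey a i) = none := rfl
    cases hf : ((PySem.List.pyRange 0 ((s.length : Int) - 4) 1).reverse).find?
        (fun j => bkey s j == bkey a i) with
    | some j => rw [← find_to_findSome, hf]
    | none =>
      rw [← find_to_findSome, hf]
      simp [hemp]
  by_cases h : c2.length ≤ c1.length
  · simp only [Analizza_alt, ge_iff_le, h, if_true]
    rw [key c1 c2, hgetD]
    rfl
  · simp only [Analizza_alt, ge_iff_le, h, if_false]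
    rw [key c2 c1, hgetD]
    rfl

-- ===== VERDICT (by name: the statement is the Claim_ definition above) =====
theorem Analizza_spec : Claim_equal_Analizza := by
  intro c1 c2 _
  unfold Spec_Analizza
  rw [A_eq_res, alt_eq_res]
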